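-- pv_equiv track=rewrite | github.com/Skalis07/TrufaDocs | editor/structure_helpers.py | _compact_lines
-- ===== SOURCE A (Python) =====
-- import unicodedata
-- from typing import Dict, List, Tuple, Set
--
-- def _compact_lines(lines: List[str]) -> List[str]:
--     compacted: List[str] = []
--     seen: Dict[str, int] = {}
--     last = ""
--     for line in lines:
--         cleaned = line.strip()
--         if not cleaned:
--             continue
--         if cleaned == last:
--             continue
--         last = cleaned
--         key = _normalize_ascii(cleaned)
--         seen[key] = seen.get(key, 0) + 1
--         # Evita duplicados frecuentes (headers, footers) sin eliminar contenido corto unico.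
--         if seen[key] > 2 and len(cleaned) > 40:
--             continue
--         compacted.append(cleaned)
--     return compacted
--
-- def _normalize_ascii(text: str) -> str:
--     normalized = unicodedata.normalize("NFKD", text)
--     cleaned = "".join(char for char in normalized if not unicodedata.combining(char))
--     cleaned = cleaned.replace("\u00a0", " ")
--     cleaned = " ".join(cleaned.split())
--     return cleaned.lower()
-- ===== SOURCE B (Python) =====
-- import unicodedata
-- from typing import Dict, List
--
-- def _normalize_ascii(text: str) -> str:
--     normalized = unicodedata.normalize("NFKD", text)
--     cleaned = "".join(char for char in normalized if not unicodedata.combining(char))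
--     cleaned = cleaned.replace("\u00a0", " ")
--     cleaned = " ".join(cleaned.split())
--     return cleaned.lower()
--
-- def _compact_lines(lines: List[str]) -> List[str]:
--     # Stage 1: strip, drop empties, collapse runs of consecutive duplicates by
--     # comparing each candidate against the last element already emitted.
--     deduped: List[str] = []
--     for line in lines:
--         s = line.strip()
--         if s and (not deduped or deduped[-1] != s):
--             deduped.append(s)
--     # Stage 2: group positions by normalized key; inside each group the ordinal
--     # of a position is its rank, so keep the first two of every group plus all
--     # short entries, then reassemble the survivors in positional order.
--     groups: Dict[str, List[int]] = {}
--     for i, s in enumerate(deduped):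
--         groups.setdefault(_normalize_ascii(s), []).append(i)
--     kept = sorted(i for idxs in groups.values()
--                   for j, i in enumerate(idxs)
--                   if j < 2 or len(deduped[i]) <= 40)
--     return [deduped[i] for i in kept]
-- ===== Notes on version B (the rewrite author's own statement) =====
-- stated objective: alternative
-- what changed: A's single stateful pass (running dict counter + last-line register deciding each line online) is replaced by an offline grouping algorithm: stage 1 collapses runs by comparing each stripped line with the last element already emitted, stage 2 groups positions by normalized key into index lists, keeps per group the first two ordinals plus all short entries, and reassembles the survivors by sorting the kept positions.
import Mathlib
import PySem

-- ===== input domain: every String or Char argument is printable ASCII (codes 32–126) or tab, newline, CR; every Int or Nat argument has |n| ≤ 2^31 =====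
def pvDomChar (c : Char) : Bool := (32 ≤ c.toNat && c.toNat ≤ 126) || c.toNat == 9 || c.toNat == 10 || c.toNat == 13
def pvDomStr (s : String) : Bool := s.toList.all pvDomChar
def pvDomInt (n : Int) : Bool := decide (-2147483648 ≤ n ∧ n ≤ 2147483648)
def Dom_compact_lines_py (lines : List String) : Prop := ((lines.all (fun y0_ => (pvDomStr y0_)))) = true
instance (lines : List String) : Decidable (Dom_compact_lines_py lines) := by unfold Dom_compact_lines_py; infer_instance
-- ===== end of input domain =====

-- B replaces A's single stateful pass (running dict counter + last-line register) by an offline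
-- grouping algorithm: run-collapse against the emitted list's last element, group positions by
-- normalized key, filter each group by ordinal, reassemble by sorting; objective: alternative.


-- shared helper: _normalize_ascii.  On the ASCII domain NFKD normalization, combining-mark
-- removal and the U+00A0 replacement are the identity, so only the whitespace collapse
-- (" ".join(text.split())) and .lower() remain; exact on Dom.
def normalize_ascii (text : String) : String :=
  PySem.Str.lower (PySem.Str.join " " (PySem.Str.split₀ text))

-- ===== PORT A =====
-- A's loop body: state (compacted, seen, last)
def stepA (st : List String × PySem.Dict String Int × String) (line : String) :
    List String × PySem.Dict String Int × String :=
  let cleaned := PySem.Str.strip line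
  if cleaned = "" then st
  else if cleaned = st.2.2 then st
  else
    let key := normalize_ascii cleaned
    let cnt := st.2.1.getD key 0 + 1
    let seen := st.2.1.insert key cnt
    if 2 < cnt ∧ 40 < PySem.Str.len cleaned then (st.1, seen, cleaned)
    else (st.1 ++ [cleaned], seen, cleaned)

def compact_lines_py (lines : List String) : List String :=
  (lines.foldl stepA (([] : List String), (PySem.Dict.empty : PySem.Dict String Int), "")).1

-- ===== PORT B =====
-- stage 1 loop body: append the stripped line unless empty or equal to the last emitted element
def step1 (acc : List String) (line : String) : List String :=
  let s := PySem.Str.strip line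
  if s ≠ "" ∧ (acc = [] ∨ acc.getLast? ≠ some s) then acc ++ [s] else acc

-- stage 2 grouping body: groups.setdefault(k, []).append(i)  (= d[k] = d.get(k, []) + [i])
def groupStep (d : PySem.Dict String (List Int)) (p : Int × String) : PySem.Dict String (List Int) :=
  d.modify (normalize_ascii p.2) [] (fun v => v ++ [p.1])

-- the generator's filter: keep index i of ordinal j when j < 2 or the entry is short
def keepFilter (ds : List String) (q : Int × Int) : Option Int :=
  if q.1 < 2 ∨ PySem.Str.len (PySem.List.pyGetD ds q.2 "") ≤ 40 then some q.2 else none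

def compact_lines_py_alt (lines : List String) : List String :=
  let ds := lines.foldl step1 []
  let groups := (PySem.List.enumerate ds).foldl groupStep PySem.Dict.empty
  let kept := PySem.List.sorted
      (groups.values.flatMap (fun idxs => (PySem.List.enumerate idxs).filterMap (keepFilter ds)))
      (fun i => i)
  kept.map (fun i => PySem.List.pyGetD ds i "")

-- ===== PRECONDITION & SPEC =====
def Spec_compact_lines_py (lines : List String) (out : List String) : Prop := out = compact_lines_py_alt lines
instance (lines : List String) (out : List String) : Decidable (Spec_compact_lines_py lines out) := by unfold Spec_compact_lines_py; infer_instance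

-- ===== CLAIM (what is proved, stated in full; the proofs are below) =====
def Claim_equal_compact_lines_py : Prop := ∀ (lines : List String), Dom_compact_lines_py lines → Spec_compact_lines_py lines (compact_lines_py lines)

-- ===== LEMMAS AND PROOFS =====

-- proof-side recursive characterisation of the run-collapsed list
def ded (p : String) : List String → List String
  | [] => []
  | x :: xs => (if x ≠ p then [x] else []) ++ ded x xs

-- proof-side recursive characterisation of stage 2: `seen` is the list of keys already processed
def sel (seen : List String) : List String → List String
  | [] => []
  | s :: rest =>
      (if seen.count (normalize_ascii s) < 2 ∨ PySem.Str.len s ≤ 40 then [s] else [])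
        ++ sel (seen ++ [normalize_ascii s]) rest

-- proof-side single-pass loop bridging A to `sel` (state: output, counter dict)
def stepC (st : List String × PySem.Dict String Int) (s : String) :
    List String × PySem.Dict String Int :=
  let k := normalize_ascii s
  let c := st.2.getD k 0 + 1
  let d := st.2.insert k c
  if 2 < c ∧ 40 < PySem.Str.len s then (st.1, d) else (st.1 ++ [s], d)

lemma ded_cons (p x : String) (xs : List String) :
    ded p (x :: xs) = (if x ≠ p then [x] else []) ++ ded x xs := rfl

-- one non-skipped line of A equals one step of stepC plus recording the new `last`
lemma stepAC (acc : List String) (seen : PySem.Dict String Int) (last line : String)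
    (h1 : ¬ PySem.Str.strip line = "") (h2 : ¬ PySem.Str.strip line = last) :
    stepA (acc, seen, last) line =
      ((stepC (acc, seen) (PySem.Str.strip line)).1,
       (stepC (acc, seen) (PySem.Str.strip line)).2, PySem.Str.strip line) := by
  simp only [stepA, stepC]
  rw [if_neg h1, if_neg h2]
  by_cases h3 : 2 < seen.getD (normalize_ascii (PySem.Str.strip line)) 0 + 1 ∧
      40 < PySem.Str.len (PySem.Str.strip line)
  · rw [if_pos h3, if_pos h3]
  · rw [if_neg h3, if_neg h3]

-- A's fold is stepC folded over the run-collapsed stripped lines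
lemma foldA_eq_foldC (lines : List String) :
    ∀ (acc : List String) (seen : PySem.Dict String Int) (last : String),
    (lines.foldl stepA (acc, seen, last)).1
      = ((ded last ((lines.map PySem.Str.strip).filter (fun s => decide (s ≠ "")))).foldl
          stepC (acc, seen)).1 := by
  induction lines with
  | nil => intro acc seen last; simp [ded]
  | cons line rest ih =>
      intro acc seen last
      simp only [List.foldl_cons, List.map_cons, List.filter_cons]
      by_cases h1 : PySem.Str.strip line = ""
      · simp [stepA, h1, ih]
      · by_cases h2 : PySem.Str.strip line = last
        · have h1' : ¬ last = "" := h2 ▸ h1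
          simp [stepA, h2, h1', ded_cons, ih]
        · rw [stepAC acc seen last line h1 h2]
          simp [ded_cons, h1, h2, ih]

-- stepC's dict is a prefix counter, so its fold is `sel`
lemma foldC_eq_sel (ds : List String) :
    ∀ (acc : List String) (d : PySem.Dict String Int) (seen : List String),
    (∀ k, d.getD k 0 = (seen.count k : Int)) →
    (ds.foldl stepC (acc, d)).1 = acc ++ sel seen ds := by
  induction ds with
  | nil => intro acc d seen _; simp [sel]
  | cons s rest ih =>
      intro acc d seen hd
      have hcnt : d.getD (normalize_ascii s) 0 + 1
          = ((seen ++ [normalize_ascii s]).count (normalize_ascii s) : Int) := by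
        rw [hd]; simp [List.count_append]
      have hd' : ∀ k, (d.insert (normalize_ascii s) (d.getD (normalize_ascii s) 0 + 1)).getD k 0
          = (((seen ++ [normalize_ascii s]).count k : Nat) : Int) := by
        intro k
        rw [PySem.Dict.getD_insert]
        by_cases hk : k = normalize_ascii s
        · rw [if_pos hk, hcnt, hk]
        · rw [if_neg hk, hd]
          simp [List.count_append, Ne.symm hk]
      simp only [List.foldl_cons, stepC, sel]
      by_cases h3 : 2 < d.getD (normalize_ascii s) 0 + 1 ∧ 40 < PySem.Str.len s
      · have hno : ¬ (seen.count (normalize_ascii s) < 2 ∨ PySem.Str.len s ≤ 40) := by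
          rcases h3 with ⟨h3a, h3b⟩
          rw [hd] at h3a
          rintro (h | h) <;> omega
        rw [if_pos h3, if_neg hno]
        simp only [List.nil_append]
        exact ih acc _ _ hd'
      · have hyes : seen.count (normalize_ascii s) < 2 ∨ PySem.Str.len s ≤ 40 := by
          rw [hd] at h3
          rcases not_and_or.mp h3 with h | h
          · left; omega
          · right; omega
        rw [if_neg h3, if_pos hyes]
        rw [ih (acc ++ [s]) _ _ hd']
        simp

-- stage 1's fold builds exactly the run-collapsed list
lemma fold1_eq_ded (lines : List String) :
    ∀ (acc : List String),
    lines.foldl step1 acc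
      = acc ++ ded (acc.getLast?.getD "") ((lines.map PySem.Str.strip).filter (fun s => decide (s ≠ ""))) := by
  induction lines with
  | nil => intro acc; simp [ded]
  | cons line rest ih =>
      intro acc
      simp only [List.foldl_cons, List.map_cons, List.filter_cons]
      by_cases h1 : PySem.Str.strip line = ""
      · simp [step1, h1, ih]
      · have hiff : (acc = [] ∨ acc.getLast? ≠ some (PySem.Str.strip line))
            ↔ ¬ PySem.Str.strip line = acc.getLast?.getD "" := by
          cases hl : acc.getLast? with
          | none =>
              simp only [Option.getD_none]
              exact ⟨fun _ => fun h => h1 h, fun _ => Or.inl (List.getLast?_eq_none_iff.mp hl)⟩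
          | some v =>
              have hacc : acc ≠ [] := by
                intro h; rw [h] at hl; simp at hl
              simp only [Option.getD_some]
              constructor
              · rintro (h | h)
                · exact absurd h hacc
                · intro he; exact h (by rw [he])
              · intro h; right; intro he
                exact h (by injection he with he'; rw [he'])
        have hdec : (decide (PySem.Str.strip line ≠ "")) = true := by simp [h1]
        rw [hdec, if_pos rfl, ded_cons]
        by_cases h2 : PySem.Str.strip line = acc.getLast?.getD ""
        · have hcF : ¬ (PySem.Str.strip line ≠ "" ∧ (acc = [] ∨ acc.getLast? ≠ some (PySem.Str.strip line))) := by
            intro hc; exact (hiff.mp hc.2) h2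
          simp only [step1, if_neg hcF]
          rw [ih acc, if_neg (not_not_intro h2), List.nil_append, h2]
        · have hcT : (PySem.Str.strip line ≠ "" ∧ (acc = [] ∨ acc.getLast? ≠ some (PySem.Str.strip line))) :=
            ⟨h1, hiff.mpr h2⟩
          simp only [step1, if_pos hcT]
          rw [ih (acc ++ [PySem.Str.strip line]), if_pos h2, List.getLast?_concat]
          simp

-- stage 2's range comprehension is `sel` (generalised over the split point j)
lemma range_eq_sel (ds : List String) :
    ∀ (j : Nat) (suf : List String), ds.drop j = suf →
    (List.range' j suf.length).filterMap (fun i =>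
      if ((ds.map normalize_ascii).take i).count ((ds.map normalize_ascii).getD i "") < 2
          ∨ PySem.Str.len (ds.getD i "") ≤ 40
      then some (ds.getD i "") else none)
    = sel ((ds.map normalize_ascii).take j) suf := by
  intro j suf
  induction suf generalizing j with
  | nil => intro _; simp [sel]
  | cons s rest ih =>
      intro hdrop
      have hget : ds[j]? = some s := by
        have h : (ds.drop j).head? = ds[j]? := List.head?_drop
        rw [hdrop] at h; simpa using h.symm
      have hjlt : j < ds.length := (List.getElem?_eq_some_iff.mp hget).1
      have hgetD : ds.getD j "" = s := by simp [List.getD, hget]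
      have hkey : (ds.map normalize_ascii).getD j "" = normalize_ascii s := by
        simp [List.getD, List.getElem?_map, hget]
      have htake : (ds.map normalize_ascii).take (j + 1)
          = (ds.map normalize_ascii).take j ++ [normalize_ascii s] := by
        rw [List.take_add_one]
        simp [List.getElem?_map, hget]
      have hdrop' : ds.drop (j + 1) = rest := by
        have h : (ds.drop j).drop 1 = ds.drop (j + 1) := by rw [List.drop_drop]
        rw [← h, hdrop]; simp
      rw [List.length_cons, List.range'_succ, List.filterMap_cons, sel]
      rw [hgetD, hkey]
      rw [ih (j + 1) hdrop', htake]
      by_cases hc : ((ds.map normalize_ascii).take j).count (normalize_ascii s) < 2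
          ∨ PySem.Str.len s ≤ 40
      · rw [if_pos hc, if_pos hc]; rfl
      · rw [if_neg hc, if_neg hc]; rfl

-- Dict.empty counts nothing
lemma empty_getD (k : String) : (PySem.Dict.empty : PySem.Dict String Int).getD k 0 = (([] : List String).count k : Int) := by
  simp [PySem.Dict.empty, PySem.Dict.getD, PySem.Dict.get?]

-- per-key index list: the positions of key c in ds, in increasing order (as Python ints)
def natIdx (ds : List String) (c : String) : List Nat :=
  (List.range ds.length).filter (fun a => normalize_ascii (ds.getD a "") == c)

def Ic (ds : List String) (c : String) : List Int :=
  (natIdx ds c).map (fun a => ((a : Nat) : Int))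

-- the kept-index predicate, phrased exactly as in range_eq_sel
def keepP (ds : List String) (a : Nat) : Bool :=
  decide (((ds.map normalize_ascii).take a).count ((ds.map normalize_ascii).getD a "") < 2
    ∨ PySem.Str.len (ds.getD a "") ≤ 40)

-- enumerate as a map over the cast range (with default "", all indices in range)
lemma enum_eq_map_range (ds : List String) :
    PySem.List.enumerate ds
      = (List.range ds.length).map (fun a => (((a : Nat) : Int), ds.getD a "")) := by
  rw [PySem.List.enumerate_eq_map_pyRange ds "", PySem.List.len_eq, PySem.List.pyRange_zero_natCast,
      List.map_map]
  refine List.map_congr_left ?_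
  intro a ha
  simp [Function.comp, PySem.List.pyGetD_natCast]

-- the groups dict looks up to the per-key index list
lemma groups_getD (ds : List String) (c : String) :
    ((PySem.List.enumerate ds).foldl groupStep PySem.Dict.empty).getD c [] = Ic ds c := by
  have hfold : (PySem.List.enumerate ds).foldl groupStep PySem.Dict.empty
      = ((PySem.List.enumerate ds).map (fun p => (normalize_ascii p.2, p.1))).foldl
          (fun d p => d.modify p.1 [] (fun v => v ++ [p.2])) PySem.Dict.empty := by
    rw [List.foldl_map]; rfl
  rw [hfold, PySem.Dict.getD_foldl_modify_append, PySem.Dict.getD_empty, List.nil_append,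
      List.filter_map, List.map_map, enum_eq_map_range, List.filter_map, List.map_map]
  unfold Ic natIdx
  rfl

lemma groups_keys_nodup (ds : List String) :
    ((PySem.List.enumerate ds).foldl groupStep PySem.Dict.empty).keys.Nodup :=
  PySem.Dict.nodup_keys_foldl_modify_key (PySem.List.enumerate ds)
    (fun p => normalize_ascii p.2) [] (fun _ p => fun v => v ++ [p.1]) PySem.Dict.empty
    PySem.Dict.nodup_keys_empty

lemma groups_mem_keys (ds : List String) (c : String) :
    c ∈ ((PySem.List.enumerate ds).foldl groupStep PySem.Dict.empty).keys
      ↔ c ∈ ds.map normalize_ascii := by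
  have h := PySem.Dict.keys_foldl_modify_key (PySem.List.enumerate ds)
    (fun p => normalize_ascii p.2) [] (fun _ p => fun v => v ++ [p.1]) PySem.Dict.empty
  have hstep : (PySem.List.enumerate ds).foldl groupStep PySem.Dict.empty
      = (PySem.List.enumerate ds).foldl
          (fun d x => d.modify (normalize_ascii x.2) [] (fun v => v ++ [x.1])) PySem.Dict.empty := rfl
  rw [hstep, h, PySem.Dict.keys_empty]
  rw [PySem.Set.mem_update]
  have hm : (PySem.List.enumerate ds).map (fun p => normalize_ascii p.2) = ds.map normalize_ascii := by
    have : (fun p : Int × String => normalize_ascii p.2)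
        = normalize_ascii ∘ (fun p : Int × String => p.2) := rfl
    rw [this, ← List.map_map, PySem.List.map_snd_enumerate]
  constructor
  · rintro (hc | hc)
    · simp at hc
    · rwa [hm] at hc
  · intro hc; right; rwa [hm]

-- the generator's filter output is a sublist of the index list it scans
lemma filterMap_keep_sublist (ds : List String) (t : List Int) (s : Int) :
    (((PySem.List.enumerate t s).filterMap (keepFilter ds))).Sublist t := by
  induction t generalizing s with
  | nil => rw [PySem.List.enumerate_nil]; exact List.Sublist.refl _
  | cons x xs ih =>
      rw [PySem.List.enumerate_cons, List.filterMap_cons]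
      unfold keepFilter
      by_cases hc : (s, x).1 < 2 ∨ PySem.Str.len (PySem.List.pyGetD ds (s, x).2 "") ≤ 40
      · rw [if_pos hc]; exact List.Sublist.cons₂ x (ih (s + 1))
      · rw [if_neg hc]; exact List.Sublist.cons x (ih (s + 1))

-- membership in the generator's filter output
lemma mem_filterMap_keep (ds : List String) (t : List Int) (i : Int) :
    i ∈ (PySem.List.enumerate t (0 : Int)).filterMap (keepFilter ds)
      ↔ ∃ (k : Nat) (h : k < t.length), t[k] = i
          ∧ (((k : Nat) : Int) < 2 ∨ PySem.Str.len (PySem.List.pyGetD ds i "") ≤ 40) := by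
  rw [List.mem_filterMap]
  constructor
  · rintro ⟨q, hq, hg⟩
    rcases (PySem.List.mem_enumerate_iff t 0 q).mp hq with ⟨k, hk, rfl⟩
    unfold keepFilter at hg
    by_cases hc : ((0 : Int) + (k : Int), t[k]).1 < 2
        ∨ PySem.Str.len (PySem.List.pyGetD ds ((0 : Int) + (k : Int), t[k]).2 "") ≤ 40
    · rw [if_pos hc] at hg
      obtain rfl : t[k] = i := by simpa using hg
      exact ⟨k, hk, rfl, by simpa using hc⟩
    · rw [if_neg hc] at hg; cases hg
  · rintro ⟨k, hk, rfl, hc⟩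
    refine ⟨((0 : Int) + (k : Int), t[k]), (PySem.List.mem_enumerate_iff t 0 _).mpr ⟨k, hk, rfl⟩, ?_⟩
    unfold keepFilter
    rw [if_pos (by simpa using hc)]

-- in a strictly increasing Nat list, the elements below u[k] are exactly the first k
lemma filter_lt_eq_take (u : List Nat) (hu : u.Pairwise (· < ·)) (k : Nat) (hk : k < u.length) :
    u.filter (fun x => decide (x < u[k])) = u.take k := by
  have hpw := List.pairwise_iff_getElem.mp hu
  have hsplit : u.filter (fun x => decide (x < u[k]))
      = (u.take k ++ u.drop k).filter (fun x => decide (x < u[k])) := by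
    rw [List.take_append_drop]
  rw [hsplit, List.filter_append]
  have h1 : (u.take k).filter (fun x => decide (x < u[k])) = u.take k := by
    apply List.filter_eq_self.mpr
    intro a ha
    rcases List.mem_iff_getElem.mp ha with ⟨j, hj, rfl⟩
    have hjk : j < k := by
      have := hj; rw [List.length_take] at this; omega
    rw [List.getElem_take]
    exact decide_eq_true (hpw j k (by omega) hk hjk)
  have h2 : (u.drop k).filter (fun x => decide (x < u[k])) = [] := by
    apply List.filter_eq_nil_iff.mpr
    intro a ha
    rcases List.mem_iff_getElem.mp ha with ⟨j, hj, rfl⟩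
    rw [List.getElem_drop]
    have hjd : j < u.length - k := by rw [← List.length_drop]; exact hj
    simp only [decide_eq_true_eq]
    rcases Nat.eq_zero_or_pos j with hj0 | hj0
    · subst hj0; simp
    · have := hpw k (k + j) (by omega) (by omega) (by omega)
      omega
  rw [h1, h2, List.append_nil]

-- prefix count of a key equals the rank of a position inside its per-key index list
lemma take_eq_map_range (ds : List String) (a : Nat) (ha : a ≤ ds.length) :
    ds.take a = (List.range a).map (fun x => ds.getD x "") := by
  apply List.ext_getElem
  · simp [List.length_take]; omega
  · intro i h1 h2
    rw [List.getElem_take, List.getElem_map, List.getElem_range]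
    have hi : i < ds.length := by rw [List.length_take] at h1; omega
    simp [List.getD, List.getElem?_eq_getElem hi]

lemma count_take_eq (ds : List String) (a : Nat) (ha : a < ds.length) (c : String) :
    ((ds.map normalize_ascii).take a).count c
      = ((natIdx ds c).filter (fun x => decide (x < a))).length := by
  rw [List.count_eq_countP, ← List.map_take, List.countP_map,
      take_eq_map_range ds a (le_of_lt ha), List.countP_map]
  unfold natIdx
  rw [List.filter_filter]
  have hsplit : List.range ds.length = List.range a ++ (List.range (ds.length - a)).map (fun x => a + x) := by
    rw [← List.range_add]; congr 1; omega
  rw [hsplit, List.filter_append]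
  have h2 : ((List.range (ds.length - a)).map (fun x => a + x)).filter
      (fun x => decide (x < a) && (normalize_ascii (ds.getD x "") == c)) = [] := by
    apply List.filter_eq_nil_iff.mpr
    intro x hx
    rcases List.mem_map.mp hx with ⟨y, _, rfl⟩
    simp
  have h1 : (List.range a).filter
      (fun x => decide (x < a) && (normalize_ascii (ds.getD x "") == c))
      = (List.range a).filter (fun x => normalize_ascii (ds.getD x "") == c) := by
    apply List.filter_congr
    intro x hx
    rw [List.mem_range] at hx
    simp [hx]
  rw [h1, h2, List.append_nil, List.countP_eq_length_filter]
  rfl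

lemma natIdx_pairwise (ds : List String) (c : String) : (natIdx ds c).Pairwise (· < ·) :=
  List.Pairwise.filter _ List.pairwise_lt_range

lemma natIdx_nodup (ds : List String) (c : String) : (natIdx ds c).Nodup :=
  (natIdx_pairwise ds c).imp (fun h => Nat.ne_of_lt h)

lemma getD_map_nrm (ds : List String) (a : Nat) (h : a < ds.length) :
    (ds.map normalize_ascii).getD a "" = normalize_ascii (ds.getD a "") := by
  simp [List.getD, List.getElem?_map, List.getElem?_eq_getElem h]

lemma mem_natIdx (ds : List String) (c : String) (a : Nat) :
    a ∈ natIdx ds c ↔ a < ds.length ∧ normalize_ascii (ds.getD a "") = c := by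
  unfold natIdx
  simp [List.mem_filter, List.mem_range]

-- rank of a position inside its per-key index list = prefix count of its key
lemma rank_eq (ds : List String) (c : String) (k : Nat) (hk : k < (natIdx ds c).length) :
    ((ds.map normalize_ascii).take ((natIdx ds c)[k])).count c = k := by
  have ha : (natIdx ds c)[k] ∈ natIdx ds c := List.getElem_mem hk
  have haltn := (mem_natIdx ds c _).mp ha
  rw [count_take_eq ds _ haltn.1 c, filter_lt_eq_take _ (natIdx_pairwise ds c) k hk,
      List.length_take]
  omega

lemma Ic_nodup (ds : List String) (c : String) : (Ic ds c).Nodup :=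
  (natIdx_nodup ds c).map (fun _ _ h => by exact_mod_cast h)

lemma mem_Ic (ds : List String) (c : String) (x : Int) :
    x ∈ Ic ds c ↔ ∃ a : Nat, a < ds.length ∧ normalize_ascii (ds.getD a "") = c ∧ x = (a : Int) := by
  unfold Ic
  rw [List.mem_map]
  constructor
  · rintro ⟨a, ha, rfl⟩
    rcases (mem_natIdx ds c a).mp ha with ⟨h1, h2⟩
    exact ⟨a, h1, h2, rfl⟩
  · rintro ⟨a, h1, h2, rfl⟩
    exact ⟨a, (mem_natIdx ds c a).mpr ⟨h1, h2⟩, rfl⟩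

-- the values list of groups is the per-key index lists over the distinct keys
lemma groups_values (ds : List String) :
    ((PySem.List.enumerate ds).foldl groupStep PySem.Dict.empty).values
      = ((PySem.List.enumerate ds).foldl groupStep PySem.Dict.empty).keys.map (fun c => Ic ds c) := by
  rw [PySem.Dict.values_eq_map_keys _ (groups_keys_nodup ds) []]
  exact List.map_congr_left (fun c _ => groups_getD ds c)

-- membership characterisation of the flattened kept indices
lemma mem_kept0 (ds : List String) (i : Int) :
    i ∈ ((((PySem.List.enumerate ds).foldl groupStep PySem.Dict.empty)).values.flatMap
          (fun idxs => (PySem.List.enumerate idxs).filterMap (keepFilter ds)))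
      ↔ ∃ a : Nat, a < ds.length ∧ keepP ds a ∧ i = ((a : Nat) : Int) := by
  rw [groups_values, List.flatMap_map, List.mem_flatMap]
  constructor
  · rintro ⟨c, hc, hm⟩
    rcases (mem_filterMap_keep ds (Ic ds c) i).mp hm with ⟨k, hk, hik, hcond⟩
    have hklen : k < (natIdx ds c).length := by
      have := hk; rwa [Ic, List.length_map] at this
    have hia : i = (((natIdx ds c)[k] : Nat) : Int) := by
      rw [← hik]; simp [Ic]
    have ha := (mem_natIdx ds c _).mp (List.getElem_mem hklen)
    refine ⟨(natIdx ds c)[k], ha.1, ?_, hia⟩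
    unfold keepP
    apply decide_eq_true
    rcases hcond with hcond | hcond
    · left
      rw [getD_map_nrm ds _ ha.1, ha.2, rank_eq ds c k hklen]
      exact_mod_cast hcond
    · right
      rw [hia, PySem.List.pyGetD_natCast] at hcond
      exact hcond
  · rintro ⟨a, han, hkeep, rfl⟩
    set c := normalize_ascii (ds.getD a "") with hc
    have hmemN : a ∈ natIdx ds c := (mem_natIdx ds c a).mpr ⟨han, rfl⟩
    have hck : c ∈ ((PySem.List.enumerate ds).foldl groupStep PySem.Dict.empty).keys := by
      rw [groups_mem_keys]
      have hda : ds.getD a "" = ds[a] := by simp [List.getD, List.getElem?_eq_getElem han]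
      exact List.mem_map.mpr ⟨ds[a], List.getElem_mem han, by rw [hc, hda]⟩
    rcases List.mem_iff_getElem.mp hmemN with ⟨k, hk, hak⟩
    refine ⟨c, hck, (mem_filterMap_keep ds (Ic ds c) _).mpr ⟨k, ?_, ?_, ?_⟩⟩
    · rw [Ic, List.length_map]; exact hk
    · simp [Ic, hak]
    · have hkeep' := of_decide_eq_true hkeep
      rcases hkeep' with h | h
      · left
        rw [getD_map_nrm ds a han, ← hc] at h
        rw [← hak] at h
        rw [rank_eq ds c k hk] at h
        exact_mod_cast h
      · right
        rw [PySem.List.pyGetD_natCast]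
        exact h

lemma kept0_nodup (ds : List String) :
    ((((PySem.List.enumerate ds).foldl groupStep PySem.Dict.empty)).values.flatMap
          (fun idxs => (PySem.List.enumerate idxs).filterMap (keepFilter ds))).Nodup := by
  rw [groups_values, List.flatMap_map]
  apply List.nodup_flatMap.mpr
  constructor
  · intro c _
    exact (filterMap_keep_sublist ds (Ic ds c) 0).nodup (Ic_nodup ds c)
  · refine (groups_keys_nodup ds).imp ?_
    intro c c' hne x hx hx'
    have h1 := (mem_Ic ds c x).mp ((filterMap_keep_sublist ds (Ic ds c) 0).subset hx)
    have h2 := (mem_Ic ds c' x).mp ((filterMap_keep_sublist ds (Ic ds c') 0).subset hx')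
    rcases h1 with ⟨a, _, hac, rfl⟩
    rcases h2 with ⟨a', _, hac', heq⟩
    have : a = a' := by exact_mod_cast heq
    exact hne (by rw [← hac, this, hac'])

-- the sorted kept indices are the filtered range
lemma sorted_kept0 (ds : List String) :
    PySem.List.sorted
      ((((PySem.List.enumerate ds).foldl groupStep PySem.Dict.empty)).values.flatMap
          (fun idxs => (PySem.List.enumerate idxs).filterMap (keepFilter ds)))
      (fun i => i)
    = ((List.range ds.length).filter (keepP ds)).map (fun a => ((a : Nat) : Int)) := by
  apply PySem.List.sorted_eq_of_perm_of_pairwise_lt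
  · -- the filtered range is a permutation of the flattened kept indices
    apply (List.perm_ext_iff_of_nodup ?_ (kept0_nodup ds)).mpr
    · intro i
      rw [mem_kept0]
      constructor
      · intro hi
        rcases List.mem_map.mp hi with ⟨a, ha, rfl⟩
        rcases List.mem_filter.mp ha with ⟨har, hap⟩
        exact ⟨a, List.mem_range.mp har, hap, rfl⟩
      · rintro ⟨a, han, hap, rfl⟩
        exact List.mem_map.mpr ⟨a, List.mem_filter.mpr ⟨List.mem_range.mpr han, hap⟩, rfl⟩
    · refine ((((List.pairwise_lt_range).filter _).map
          (fun a : Nat => ((a : Nat) : Int)) ?_).imp (fun h => Int.ne_of_lt h))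
      intro a b h
      simpa using h
  · refine ((List.pairwise_lt_range).filter _).map _ ?_
    intro a b h
    simpa using h

-- ===== VERDICT (by name: the statement is the Claim_ definition above) =====
theorem compact_lines_py_spec : Claim_equal_compact_lines_py := by
  intro lines _
  show compact_lines_py lines = compact_lines_py_alt lines
  have h1 := fold1_eq_ded lines []
  simp only [List.getLast?_nil, Option.getD_none, List.nil_append] at h1
  rw [compact_lines_py, foldA_eq_foldC lines [] PySem.Dict.empty "",
      foldC_eq_sel _ [] PySem.Dict.empty [] (fun k => empty_getD k), List.nil_append]
  simp only [compact_lines_py_alt]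
  rw [sorted_kept0, List.map_map]
  have hmap : ((fun i => PySem.List.pyGetD (lines.foldl step1 []) i "")
        ∘ (fun a => ((a : Nat) : Int)))
      = fun a : Nat => (lines.foldl step1 []).getD a "" := by
    funext a; simp [Function.comp, PySem.List.pyGetD_natCast]
  rw [hmap]
  have hconv : ∀ (ds : List String),
      ((List.range ds.length).filter (keepP ds)).map (fun a => ds.getD a "")
        = (List.range ds.length).filterMap (fun i =>
            if ((ds.map normalize_ascii).take i).count ((ds.map normalize_ascii).getD i "") < 2
                ∨ PySem.Str.len (ds.getD i "") ≤ 40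
            then some (ds.getD i "") else none) := by
    intro ds
    induction (List.range ds.length) with
    | nil => rfl
    | cons x xs ih =>
        rw [List.filter_cons, List.filterMap_cons]
        by_cases h : ((ds.map normalize_ascii).take x).count ((ds.map normalize_ascii).getD x "") < 2
            ∨ PySem.Str.len (ds.getD x "") ≤ 40
        · have hp : keepP ds x = true := decide_eq_true h
          rw [if_pos hp, if_pos h, List.map_cons, ih]
        · have hp : keepP ds x = false := decide_eq_false h
          rw [if_neg (by rw [hp]; exact Bool.false_ne_true), if_neg h, ih]
  rw [hconv, List.range_eq_range',
      range_eq_sel (lines.foldl step1 []) 0 (lines.foldl step1 []) (by simp),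
      List.take_zero, h1]
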